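-- pv_equiv track=rewrite | github.com/Sriraaj27/D10_PYTHON | Python/sum_of_biggest.py | sum_of_biggest
-- ===== SOURCE A (Python) =====
-- def sum_of_biggest(nums):
--     minimum=min(nums)
--     result=[]
--     for i in nums:
--         if i>minimum:
--             result.append(i)
--     sum_of_numbers=sum(result)
--     return sum_of_numbers
-- ===== SOURCE B (Python) =====
-- def sum_of_biggest(nums):
--     it = iter(nums)
--     m = next(it)
--     total = m
--     cnt = 1
--     for x in it:
--         total += x
--         if x < m:
--             m, cnt = x, 1
--         elif x == m:
--             cnt += 1
--     return total - m * cnt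
-- ===== Notes on version B (the rewrite author's own statement) =====
-- stated objective: alternative
-- what changed: B makes a single streaming pass carrying (current min, running total, count of current min) and returns total - min*count, instead of A's two stages (min() call, then building a filtered list and summing it).
import Mathlib
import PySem

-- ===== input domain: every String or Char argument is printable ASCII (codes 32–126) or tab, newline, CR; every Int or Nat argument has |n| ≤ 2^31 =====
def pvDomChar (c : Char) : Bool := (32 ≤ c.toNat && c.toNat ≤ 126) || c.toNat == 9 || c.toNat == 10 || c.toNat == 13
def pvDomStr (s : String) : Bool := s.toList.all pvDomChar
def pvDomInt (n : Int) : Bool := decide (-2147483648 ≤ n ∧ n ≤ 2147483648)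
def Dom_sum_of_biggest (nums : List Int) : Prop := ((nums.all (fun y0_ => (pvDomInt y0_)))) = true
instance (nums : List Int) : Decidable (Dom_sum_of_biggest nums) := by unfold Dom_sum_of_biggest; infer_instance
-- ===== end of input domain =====

-- B replaces A's two-stage (min(), then filter-and-sum) by one streaming pass keeping (min, total, count-of-min) and returning total - min*count; same O(n), no intermediate list.
-- A raises ValueError on the empty list (min([])); Pre_ excludes it (B raises StopIteration there too).


-- ===== PORT A =====
def sum_of_biggest (nums : List Int) : Int :=
  match PySem.List.min? nums (fun x => x) with
  | none => 0  -- unreachable: Pre_ excludes [] (Python raises ValueError)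
  | some minimum =>
    let result := nums.foldl (fun acc i => if i > minimum then acc ++ [i] else acc) []
    result.foldl (fun acc x => acc + x) 0

-- ===== PORT B =====
-- one streaming pass: state = (current min m, running total, count of m so far)
def sobStep (st : Int × Int × Int) (x : Int) : Int × Int × Int :=
  let m := st.1; let total := st.2.1 + x; let cnt := st.2.2
  if x < m then (x, total, 1)
  else if x == m then (m, total, cnt + 1)
  else (m, total, cnt)

def sum_of_biggest_alt (nums : List Int) : Int :=
  match nums with
  | [] => 0  -- unreachable: Pre_ excludes [] (Python's next() raises StopIteration)
  | h :: t =>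
    let st := t.foldl sobStep (h, h, 1)
    st.2.1 - st.1 * st.2.2

-- ===== PRECONDITION & SPEC =====
-- Pre_ excludes only the empty list, on which both Pythons raise.
def Pre_sum_of_biggest (nums : List Int) : Prop := nums ≠ []
instance (nums : List Int) : Decidable (Pre_sum_of_biggest nums) := by unfold Pre_sum_of_biggest; infer_instance
def pvWitness_sum_of_biggest : List Int := ([1, 2, 1])
def Spec_sum_of_biggest (nums : List Int) (out : Int) : Prop := out = sum_of_biggest_alt nums
instance (nums : List Int) (out : Int) : Decidable (Spec_sum_of_biggest nums out) := by unfold Spec_sum_of_biggest; infer_instance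

-- ===== CLAIM =====
def Claim_equal_sum_of_biggest : Prop := ∀ (nums : List Int), Dom_sum_of_biggest nums → Pre_sum_of_biggest nums → Spec_sum_of_biggest nums (sum_of_biggest nums)

-- ===== LEMMAS AND PROOFS =====

-- A's append loop builds the filter of elements > m
lemma foldl_gt_filter (m : Int) (l : List Int) : ∀ acc : List Int,
    l.foldl (fun acc i => if i > m then acc ++ [i] else acc) acc
      = acc ++ l.filter (fun x => m < x) := by
  induction l with
  | nil => simp
  | cons x t ih =>
    intro acc
    by_cases h : m < x
    · simp [h, ih]
    · simp [h, ih]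

-- core identity: if m bounds l from below, sum of elements > m = total sum - m * (count of m)
lemma filter_gt_sum (m : Int) (l : List Int) (h : ∀ x ∈ l, m ≤ x) :
    (l.filter (fun x => m < x)).sum = l.sum - m * l.count m := by
  induction l with
  | nil => simp
  | cons x t ih =>
    have hx : m ≤ x := h x (by simp)
    have ht : ∀ y ∈ t, m ≤ y := fun y hy => h y (by simp [hy])
    by_cases hlt : m < x
    · have hne : x ≠ m := by omega
      simp [hlt, hne, ih ht]
      ring
    · have hxm : x = m := by omega
      simp [hxm, ih ht]
      ring

-- running min never exceeds its initial value
lemma foldl_min_le (l : List Int) : ∀ a : Int, l.foldl min a ≤ a := by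
  induction l with
  | nil => intro a; simp
  | cons y t ih => intro a; exact le_trans (ih (min a y)) (min_le_left a y)

-- B's loop invariant: the state tracks (running min, running total, count of the running min)
lemma sob_loop (l : List Int) : ∀ (m total cnt : Int),
    l.foldl sobStep (m, total, cnt)
      = (l.foldl min m, total + l.sum,
         if l.foldl min m = m then cnt + l.count m else (l.count (l.foldl min m) : Int)) := by
  induction l with
  | nil => intro m total cnt; simp
  | cons x t ih =>
    intro m total cnt
    rcases lt_trichotomy x m with h | h | h
    · have hstep : sobStep (m, total, cnt) x = (x, total + x, 1) := by
        simp [sobStep, h]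
      have hmx : min m x = x := by omega
      have hMle : t.foldl min x ≤ x := foldl_min_le t x
      have hMm : t.foldl min x ≠ m := by omega
      simp only [List.foldl_cons, hstep, ih, hmx, List.sum_cons, hMm, if_false]
      simp only [Prod.mk.injEq]
      refine ⟨trivial, by ring, ?_⟩
      by_cases hx : t.foldl min x = x
      · simp [hx, List.count_cons_self]; ring
      · simp [hx, Ne.symm hx]
    · have hstep : sobStep (m, total, cnt) x = (m, total + x, cnt + 1) := by
        simp [sobStep, h]
      have hmx : min m x = m := by omega
      simp only [List.foldl_cons, hstep, ih, hmx, List.sum_cons]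
      simp only [Prod.mk.injEq]
      refine ⟨trivial, by ring, ?_⟩
      by_cases hm : t.foldl min m = m
      · simp [hm, h, List.count_cons_self]; ring
      · have hxM : x ≠ t.foldl min m := by rw [h]; exact fun he => hm he.symm
        simp [hm, hxM]
    · have hstep : sobStep (m, total, cnt) x = (m, total + x, cnt) := by
        have h1 : ¬ x < m := by omega
        have h2 : (x == m) = false := by simp; omega
        simp [sobStep, h1, h2]
      have hmx : min m x = m := by omega
      have hMle : t.foldl min m ≤ m := foldl_min_le t m
      simp only [List.foldl_cons, hstep, ih, hmx, List.sum_cons]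
      simp only [Prod.mk.injEq]
      refine ⟨trivial, by ring, ?_⟩
      by_cases hm : t.foldl min m = m
      · have hxm : x ≠ m := by omega
        simp [hm, hxm]
      · have hxM : x ≠ t.foldl min m := by omega
        simp [hm, hxM]

-- ===== VERDICT =====
theorem sum_of_biggest_spec : Claim_equal_sum_of_biggest := by
  intro nums _ hpre
  unfold Spec_sum_of_biggest sum_of_biggest sum_of_biggest_alt
  match nums, hpre with
  | h :: t, _ =>
    rw [PySem.List.min?_id_cons h t]
    dsimp only
    rw [foldl_gt_filter, List.nil_append, sob_loop]
    dsimp only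
    rw [PySem.List.foldl_add (g := fun x => x)]
    have hbound : ∀ y ∈ h :: t, t.foldl min h ≤ y := by
      have hmin : PySem.List.min? (h :: t) (fun x => x) = some (t.foldl min h) :=
        PySem.List.min?_id_cons h t
      intro y hy; exact PySem.List.min?_isMin hmin y hy
    simp only [List.map_id_fun', id, zero_add, filter_gt_sum _ _ hbound]
    by_cases hm : t.foldl min h = h
    · simp [hm, List.count_cons_self, List.sum_cons]
      exact Or.inl (by ring)
    · have hxh : h ≠ t.foldl min h := fun he => hm he.symm
      simp [hm, List.count_cons, List.sum_cons]
      exact Or.inl hxh
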